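-- pv_equiv track=rewrite | github.com/LuisPHenriques/Continente_Project_LCED | functions.py | count_unique_transactions
-- ===== SOURCE A (Python) =====
-- def count_unique_transactions(customer_transactions):
--     prev_transaction = None
--     count = 0
--     counts = []
--     for transaction in customer_transactions:
--         if transaction != prev_transaction:
--             count += 1
--         counts.append(count)
--         prev_transaction = transaction
--     return counts
-- ===== SOURCE B (Python) =====
-- def count_unique_transactions(customer_transactions):
--     xs = list(customer_transactions)
--     if not xs:
--         return []
--     # pass 1: change indicators (first element always starts a new group)
--     indicators = [1] + [1 if b != a else 0 for a, b in zip(xs, xs[1:])]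
--     # pass 2: prefix sums of the indicators
--     sums = []
--     total = 0
--     for d in indicators:
--         total += d
--         sums.append(total)
--     return sums
-- ===== Notes on version B (the rewrite author's own statement) =====
-- stated objective: alternative
-- what changed: B replaces A's single stateful compare-and-count loop by two passes: a pairwise zip producing 0/1 change indicators, then a prefix-sum over the indicators.
import Mathlib
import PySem

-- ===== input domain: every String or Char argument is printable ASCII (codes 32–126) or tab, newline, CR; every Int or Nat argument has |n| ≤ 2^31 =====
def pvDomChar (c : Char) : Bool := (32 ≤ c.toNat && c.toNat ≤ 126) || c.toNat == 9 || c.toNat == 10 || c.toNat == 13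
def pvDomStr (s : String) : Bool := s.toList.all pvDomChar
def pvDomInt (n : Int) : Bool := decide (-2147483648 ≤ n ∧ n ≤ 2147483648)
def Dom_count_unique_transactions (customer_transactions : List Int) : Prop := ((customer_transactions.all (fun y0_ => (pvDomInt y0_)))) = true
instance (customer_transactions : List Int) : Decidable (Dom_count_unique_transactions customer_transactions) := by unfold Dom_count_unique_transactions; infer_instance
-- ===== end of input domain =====

-- B replaces A's single stateful compare-and-count loop by two passes (change indicators, then prefix sums); same cost, alternative decomposition.


-- ===== PORT A =====
-- loop over the transactions carrying (prev : Option Int, count, counts), appending count each step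
def cutALoop (xs : List Int) (prev : Option Int) (count : Int) (counts : List Int) : List Int :=
  match xs with
  | [] => counts
  | t :: rest =>
    let c := if some t ≠ prev then count + 1 else count
    cutALoop rest (some t) c (counts ++ [c])

def count_unique_transactions (customer_transactions : List Int) : List Int :=
  cutALoop customer_transactions none 0 []

-- ===== PORT B =====
-- pass 1: 0/1 change indicators (first element always starts a new group)
def cutIndicators (xs : List Int) : List Int :=
  match xs with
  | [] => []
  | _ :: rest => 1 :: List.zipWith (fun a b => if b ≠ a then (1 : Int) else 0) xs rest

-- pass 2: prefix sums of the indicators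
def cutPrefixSums (total : Int) : List Int → List Int
  | [] => []
  | d :: rest => (total + d) :: cutPrefixSums (total + d) rest

def count_unique_transactions_alt (customer_transactions : List Int) : List Int :=
  cutPrefixSums 0 (cutIndicators customer_transactions)

-- ===== PRECONDITION & SPEC =====
def Spec_count_unique_transactions (customer_transactions : List Int) (out : List Int) : Prop := out = count_unique_transactions_alt customer_transactions
instance (customer_transactions : List Int) (out : List Int) : Decidable (Spec_count_unique_transactions customer_transactions out) := by unfold Spec_count_unique_transactions; infer_instance

-- ===== CLAIM (what is proved, stated in full; the proofs are below) =====
def Claim_equal_count_unique_transactions : Prop := ∀ (customer_transactions : List Int), Dom_count_unique_transactions customer_transactions → Spec_count_unique_transactions customer_transactions (count_unique_transactions customer_transactions)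

-- ===== LEMMAS AND PROOFS =====
theorem cutALoop_eq_prefixSums (xs : List Int) : ∀ (p c : Int) (acc : List Int),
    cutALoop xs (some p) c acc
      = acc ++ cutPrefixSums c (List.zipWith (fun a b => if b ≠ a then (1 : Int) else 0) (p :: xs) xs) := by
  induction xs with
  | nil => intro p c acc; simp [cutALoop, cutPrefixSums]
  | cons t rest ih =>
    intro p c acc
    simp only [cutALoop, List.zipWith, cutPrefixSums]
    by_cases h : t = p
    · simp [h, ih, List.append_assoc]
    · have : some t ≠ some p := by simp [h]
      simp [h, this, ih, List.append_assoc]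

-- ===== VERDICT (by name: the statement is the Claim_ definition above) =====
theorem count_unique_transactions_spec : Claim_equal_count_unique_transactions := by
  intro xs _
  unfold Spec_count_unique_transactions count_unique_transactions count_unique_transactions_alt
  cases xs with
  | nil => rfl
  | cons t rest =>
    simp only [cutALoop, cutIndicators, cutPrefixSums]
    simpa using cutALoop_eq_prefixSums rest t 1 [1]
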